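-- pv_equiv track=rewrite | github.com/eitanrosenfelder/News-and-pedicting-the-market | news to data - for git.py | extracting_placments
-- ===== SOURCE A (Python) =====
-- def findall(p, s):
--     '''Yields all the positions of
--     the pattern p in the string s.'''
--     i = s.find(p)
--     while i != -1:
--         yield i
--         i = s.find(p, i + 1)
--
-- def extracting_placments(string):
--     lst_dates = [(i) for i in findall('Publish_Date', string)]
--     lst_head = [(i) for i in findall("', 'Headline", string)]
--     lst_headline_end = [(i) for i in findall(", 'Author'", string)]
--     lst_articles_start = [(i) for i in findall("Article_Text", string)]
--     lst_articles_end = [(i) for i in findall("}, 'https", string)]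
--     lst_articles_miss = [(i) for i in findall("Don't miss:", string)]
--     return lst_dates, lst_head, lst_headline_end, lst_articles_start, lst_articles_end, lst_articles_miss
-- ===== SOURCE B (Python) =====
-- def _positions(p, s):
--     return [i for i in range(len(s)) if s.startswith(p, i)]
--
-- def extracting_placments(string):
--     return (_positions('Publish_Date', string),
--             _positions("', 'Headline", string),
--             _positions(", 'Author'", string),
--             _positions("Article_Text", string),
--             _positions("}, 'https", string),
--             _positions("Don't miss:", string))
-- ===== Notes on version B (the rewrite author's own statement) =====
-- stated objective: simpler
-- what changed: Replaced the generator that repeatedly calls str.find with start+1 by a direct comprehension over all indices testing str.startswith at each position.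
import Mathlib
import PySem

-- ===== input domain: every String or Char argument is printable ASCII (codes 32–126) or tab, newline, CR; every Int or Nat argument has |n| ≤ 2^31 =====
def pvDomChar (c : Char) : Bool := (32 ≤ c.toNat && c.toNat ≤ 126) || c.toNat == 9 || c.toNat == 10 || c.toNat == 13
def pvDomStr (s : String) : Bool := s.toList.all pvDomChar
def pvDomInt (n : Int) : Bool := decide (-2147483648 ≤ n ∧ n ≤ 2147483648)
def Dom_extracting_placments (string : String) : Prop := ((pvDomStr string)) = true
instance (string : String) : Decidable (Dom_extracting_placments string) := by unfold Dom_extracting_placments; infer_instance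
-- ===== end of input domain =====

-- B replaces A's repeated str.find(p, i+1) generator loop by a single comprehension over
-- all indices testing startswith at each position (objective: simpler; same return value).


-- ===== PORT A =====
-- findall's while-loop: i = s.find(p); while i != -1: yield i; i = s.find(p, i+1)
-- (fuel only makes the loop total; s.length + 1 steps always suffice, proved below)
def findallGo (p s : List Char) (fuel : Nat) (i : Int) : List Int :=
  match fuel with
  | 0 => []
  | fuel + 1 =>
      if i = -1 then []
      else i :: findallGo p s fuel (PySem.Chars.findFrom s p (i + 1))

def findall (p s : List Char) : List Int :=
  findallGo p s (s.length + 1) (PySem.Chars.find s p)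

def extracting_placments (string : String) :
    List Int × List Int × List Int × List Int × List Int × List Int :=
  let s := string.toList
  (findall "Publish_Date".toList s,
   findall "', 'Headline".toList s,
   findall ", 'Author'".toList s,
   findall "Article_Text".toList s,
   findall "}, 'https".toList s,
   findall "Don't miss:".toList s)

-- ===== PORT B =====
-- [i for i in range(len(s)) if s.startswith(p, i)]  (startswith(p, i) = s[i:] starts with p)
def positionsB (p s : List Char) : List Int :=
  ((List.range s.length).filter (fun i => PySem.Chars.startswith (s.drop i) p)).map
    (fun i => (i : Int))

def extracting_placments_alt (string : String) :
    List Int × List Int × List Int × List Int × List Int × List Int :=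
  let s := string.toList
  (positionsB "Publish_Date".toList s,
   positionsB "', 'Headline".toList s,
   positionsB ", 'Author'".toList s,
   positionsB "Article_Text".toList s,
   positionsB "}, 'https".toList s,
   positionsB "Don't miss:".toList s)

-- ===== PRECONDITION & SPEC =====
def Spec_extracting_placments (string : String) (out : List Int × List Int × List Int × List Int × List Int × List Int) : Prop := out = extracting_placments_alt string
instance (string : String) (out : List Int × List Int × List Int × List Int × List Int × List Int) : Decidable (Spec_extracting_placments string out) := by unfold Spec_extracting_placments; infer_instance

-- ===== CLAIM (what is proved, stated in full; the proofs are below) =====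
def Claim_equal_extracting_placments : Prop := ∀ (string : String), Dom_extracting_placments string → Spec_extracting_placments string (extracting_placments string)

-- ===== LEMMAS AND PROOFS =====

-- splitting the filtered range at the first match j ≥ k
lemma filter_range_split (n j k : Nat) (P : Nat → Bool) (hj : j < n) (hk : k ≤ j)
    (hPj : P j = true) (hmin : ∀ i, k ≤ i → i < j → P i = false) :
    (List.range n).filter (fun i => decide (k ≤ i) && P i)
      = (j : Nat) :: (List.range n).filter (fun i => decide (j + 1 ≤ i) && P i) := by
  have hn : n = (j + 1) + (n - (j + 1)) := by omega
  rw [hn, List.range_add, List.filter_append, List.filter_append, List.range_succ,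
      List.filter_append, List.filter_append]
  have h1 : (List.range j).filter (fun i => decide (k ≤ i) && P i) = [] := by
    apply List.filter_eq_nil_iff.mpr
    intro i hi
    have hij : i < j := List.mem_range.mp hi
    by_cases hki : k ≤ i
    · simp [hmin i hki hij]
    · simp [hki]
  have h2 : (List.range j).filter (fun i => decide (j + 1 ≤ i) && P i) = [] := by
    apply List.filter_eq_nil_iff.mpr
    intro i hi
    have hij : i < j := List.mem_range.mp hi
    simp [show ¬ (j + 1 ≤ i) by omega]
  have h3 : ([j].filter (fun i => decide (k ≤ i) && P i)) = [j] := by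
    simp [List.filter, hk, hPj]
  have h4 : ([j].filter (fun i => decide (j + 1 ≤ i) && P i)) = [] := by
    simp [List.filter]
  have h5 : ((List.range (n - (j + 1))).map (fun x => (j + 1) + x)).filter
        (fun i => decide (k ≤ i) && P i)
      = ((List.range (n - (j + 1))).map (fun x => (j + 1) + x)).filter
        (fun i => decide (j + 1 ≤ i) && P i) := by
    apply List.filter_congr
    intro a ha
    obtain ⟨x, -, rfl⟩ := List.mem_map.mp ha
    simp [show k ≤ j + 1 + x by omega, show j + 1 ≤ j + 1 + x by omega]
  rw [h1, h2, h3, h4, h5]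
  simp

-- A's loop starting from findFrom s p k produces exactly the matching positions ≥ k
lemma findallGo_eq (p s : List Char) (hp : p ≠ []) :
    ∀ (fuel k : Nat), k ≤ s.length → s.length + 1 ≤ fuel + k →
      findallGo p s fuel (PySem.Chars.findFrom s p (k : Int))
        = ((List.range s.length).filter
            (fun i => decide (k ≤ i) && PySem.Chars.startswith (s.drop i) p)).map
            (fun i => (i : Int)) := by
  intro fuel
  induction fuel with
  | zero => intro k hk hf; omega
  | succ fuel ih =>
    intro k hk hf
    by_cases hneg : PySem.Chars.findFrom s p (k : Int) = -1
    · -- no further occurrence: the filtered range is empty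
      have hnot : ¬ p <:+: s.drop k :=
        (PySem.Chars.findFrom_natCast_eq_neg_one_iff s p k hk).mp hneg
      have hfil : (List.range s.length).filter
          (fun i => decide (k ≤ i) && PySem.Chars.startswith (s.drop i) p) = [] := by
        apply List.filter_eq_nil_iff.mpr
        intro i hi
        by_cases hki : k ≤ i
        · by_cases hpre : PySem.Chars.startswith (List.drop i s) p = true
          · exfalso
            apply hnot
            have hpre' : p <+: (s.drop k).drop (i - k) := by
              rw [List.drop_drop]
              have h : k + (i - k) = i := by omega
              rw [h]
              exact (PySem.Chars.startswith_iff _ _).mp hpre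
            have : ∃ j, p <+: (s.drop k).drop j := ⟨i - k, hpre'⟩
            exact (PySem.Chars.isIn_iff_infix _ _).mp
              ((PySem.Chars.exists_prefix_drop_iff_isIn _ _).mp this)
          · simp [hpre]
        · simp [hki]
      rw [hfil]
      simp [findallGo, hneg]
    · obtain ⟨hkr, hpre, hmin⟩ := PySem.Chars.findFrom_natCast_spec s p k hk hneg
      set r := PySem.Chars.findFrom s p (k : Int) with hr
      have hr0 : 0 ≤ r := le_trans (by exact_mod_cast Nat.zero_le k) hkr
      have hrj : r = ((r.toNat : Nat) : Int) := by omega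
      set j := r.toNat with hj
      have hkj : k ≤ j := by omega
      have hjlt : j < s.length := by
        by_contra hge
        have : s.drop j = [] := List.drop_eq_nil_of_le (by omega)
        rw [this] at hpre
        exact hp (List.prefix_nil.mp hpre)
      have hstep : r + 1 = ((j + 1 : Nat) : Int) := by omega
      have htail := ih (j + 1) (by omega) (by omega)
      rw [findallGo]
      simp only [hneg, if_false]
      rw [hstep, htail, hrj]
      have hPj : PySem.Chars.startswith (List.drop j s) p = true :=
        (PySem.Chars.startswith_iff _ _).mpr hpre
      have hmin' : ∀ i, k ≤ i → i < j → PySem.Chars.startswith (List.drop i s) p = false := by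
        intro i h1 h2
        by_contra hne
        exact hmin i h1 h2 ((PySem.Chars.startswith_iff _ _).mp (by simpa using hne))
      rw [filter_range_split s.length j k _ hjlt hkj hPj hmin']
      simp

lemma findall_eq_positionsB (p s : List Char) (hp : p ≠ []) :
    findall p s = positionsB p s := by
  unfold findall positionsB
  have h0 : PySem.Chars.find s p = PySem.Chars.findFrom s p ((0 : Nat) : Int) := by
    simp [PySem.Chars.findFrom_zero]
  rw [h0, findallGo_eq p s hp (s.length + 1) 0 (Nat.zero_le _) (by omega)]
  simp

-- ===== VERDICT (by name: the statement is the Claim_ definition above) =====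
theorem extracting_placments_spec : Claim_equal_extracting_placments := by
  intro string _
  unfold Spec_extracting_placments extracting_placments extracting_placments_alt
  simp only
  rw [findall_eq_positionsB "Publish_Date".toList _ (by decide),
      findall_eq_positionsB "', 'Headline".toList _ (by decide),
      findall_eq_positionsB ", 'Author'".toList _ (by decide),
      findall_eq_positionsB "Article_Text".toList _ (by decide),
      findall_eq_positionsB "}, 'https".toList _ (by decide),
      findall_eq_positionsB "Don't miss:".toList _ (by decide)]
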